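-- pv_equiv track=rewrite | github.com/cdccnleo/RQA2025 | batch_fix_syntax_errors.py | fix_duplicate_methods_and_indent
-- ===== SOURCE A (Python) =====
-- def fix_duplicate_methods_and_indent(content):
--     """修复重复方法定义和缩进问题"""
--     lines = content.split('\n')
--     fixed_lines = []
--     skip_next = False
--
--     i = 0
--     while i < len(lines):
--         line = lines[i].rstrip()
--
--         # 跳过空行
--         if not line:
--             fixed_lines.append('')
--             i += 1
--             continue
--
--         # 处理类定义
--         if line.startswith('class '):
--             fixed_lines.append(line)
--             i += 1
--             continue
--
--         # 处理方法定义
--         if line.startswith('    def '):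
--             method_name = line.split('(')[0].strip()
--
--             # 检查是否有重复的方法定义
--             if i + 1 < len(lines):
--                 next_line = lines[i + 1].rstrip()
--                 if (next_line.startswith('    def ') and
--                     next_line.split('(')[0].strip() == method_name and
--                         '"""' in next_line):
--                     # 跳过空的方法定义，保留有文档字符串的版本
--                     i += 1
--                     continue
--
--             fixed_lines.append(line)
--             i += 1
--             continue
--
--         # 处理其他行
--         fixed_lines.append(line)
--         i += 1
--
--     return '\n'.join(fixed_lines)
-- ===== SOURCE B (Python) =====
-- def fix_duplicate_methods_and_indent(content):
--     """修复重复方法定义和缩进问题"""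
--     fixed_lines = []
--     for raw in content.split('\n'):
--         line = raw.rstrip()
--         if (line.startswith('    def ') and '"""' in line and fixed_lines
--                 and fixed_lines[-1].startswith('    def ')
--                 and fixed_lines[-1].split('(')[0].strip() == line.split('(')[0].strip()):
--             fixed_lines.pop()
--         fixed_lines.append(line)
--     return '\n'.join(fixed_lines)
-- ===== Notes on version B (the rewrite author's own statement) =====
-- stated objective: alternative
-- what changed: Replaces A's index-based while loop that peeks at lines[i+1] to skip the earlier duplicate def with a single forward pass treating fixed_lines as a stack: when the later docstring-carrying duplicate def arrives, the previously appended def is popped before appending it.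
import Mathlib
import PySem

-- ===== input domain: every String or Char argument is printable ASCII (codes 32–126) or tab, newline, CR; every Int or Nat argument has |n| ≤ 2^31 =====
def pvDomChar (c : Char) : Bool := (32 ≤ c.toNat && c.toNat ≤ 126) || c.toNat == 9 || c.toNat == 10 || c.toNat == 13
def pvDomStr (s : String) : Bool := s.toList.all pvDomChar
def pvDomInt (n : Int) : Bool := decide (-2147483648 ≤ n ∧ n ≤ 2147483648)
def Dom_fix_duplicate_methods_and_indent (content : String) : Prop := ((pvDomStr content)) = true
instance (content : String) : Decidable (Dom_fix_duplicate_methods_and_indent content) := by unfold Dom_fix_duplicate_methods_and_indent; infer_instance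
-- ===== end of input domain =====

-- B replaces A's index+lookahead while loop (skip the EARLIER duplicate def by peeking at lines[i+1]) with a
-- single stack pass that POPS the previously appended def when the later docstring-carrying duplicate arrives
-- (alternative decomposition, same cost).

-- shared helpers mirroring expressions both Pythons contain verbatim:
-- s.split(sep) for a non-empty literal sep (split? is none only for sep = "", so getD is exact)
def pvSplit (s sep : String) : List String :=
  (PySem.Str.split? s sep).getD []
-- line.split('(')[0].strip()  (split('(') is never empty, so [0] never raises)
def pvMethodName (line : String) : String :=
  PySem.Str.strip ((pvSplit line "(").headD "")

-- ===== PORT A =====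
-- the while loop over i with lookahead lines[i+1], as structural recursion on the list of lines
def pvLoopA : List String → List String
  | [] => []
  | l :: rest =>
    let line := PySem.Str.rstrip l
    if line = "" then "" :: pvLoopA rest
    else if PySem.Str.startswith line "class " then line :: pvLoopA rest
    else if PySem.Str.startswith line "    def " then
      let method_name := pvMethodName line
      match rest with
      | next_raw :: _ =>
        let next_line := PySem.Str.rstrip next_raw
        if PySem.Str.startswith next_line "    def " &&
           pvMethodName next_line == method_name &&
           PySem.Str.isIn "\"\"\"" next_line
        then pvLoopA rest
        else line :: pvLoopA rest
      | [] => line :: pvLoopA rest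
    else line :: pvLoopA rest

def fix_duplicate_methods_and_indent (content : String) : String :=
  PySem.Str.join "\n" (pvLoopA (pvSplit content "\n"))

-- ===== PORT B =====
-- Source B's stack step: acc is fixed_lines reversed (head = fixed_lines[-1]); pop = drop the head
def pvStepB (acc : List String) (raw : String) : List String :=
  let line := PySem.Str.rstrip raw
  if (PySem.Str.startswith line "    def " && PySem.Str.isIn "\"\"\"" line &&
      (match acc with
       | top :: _ => PySem.Str.startswith top "    def " &&
                     pvMethodName top == pvMethodName line
       | [] => false))
  then line :: acc.tail
  else line :: acc

def fix_duplicate_methods_and_indent_alt (content : String) : String :=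
  PySem.Str.join "\n" (((pvSplit content "\n").foldl pvStepB []).reverse)

-- ===== PRECONDITION & SPEC =====
def Spec_fix_duplicate_methods_and_indent (content : String) (out : String) : Prop := out = fix_duplicate_methods_and_indent_alt content
instance (content : String) (out : String) : Decidable (Spec_fix_duplicate_methods_and_indent content out) := by unfold Spec_fix_duplicate_methods_and_indent; infer_instance

-- ===== CLAIM (what is proved, stated in full; the proofs are below) =====
def Claim_equal_fix_duplicate_methods_and_indent : Prop := ∀ (content : String), Dom_fix_duplicate_methods_and_indent content → Spec_fix_duplicate_methods_and_indent content (fix_duplicate_methods_and_indent content)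

-- ===== LEMMAS AND PROOFS =====

-- the duplicate test both programs perform, between an already-emitted line `prev` and the current line `cur`
def pvDup (prev cur : String) : Bool :=
  PySem.Str.startswith prev "    def " && PySem.Str.startswith cur "    def " &&
  (pvMethodName cur == pvMethodName prev) && PySem.Str.isIn "\"\"\"" cur

-- the (reversed) output both loops emit after `top` has been tentatively emitted, given the remaining raw lines
def pvH (top : String) : List String → List String
  | [] => [top]
  | l :: rest =>
    let line := PySem.Str.rstrip l
    if pvDup top line then pvH line rest else pvH line rest ++ [top]

theorem pvDup_not_def {prev : String} (cur : String)
    (h : PySem.Str.startswith prev "    def " = false) : pvDup prev cur = false := by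
  unfold pvDup
  rw [h]
  simp

theorem pvDup_of_def {prev : String} (cur : String)
    (h : PySem.Str.startswith prev "    def " = true) :
    pvDup prev cur = (PySem.Str.startswith cur "    def " &&
      pvMethodName cur == pvMethodName prev && PySem.Str.isIn "\"\"\"" cur) := by
  unfold pvDup
  rw [h]
  simp

theorem pvNotClassDef (s : String) (h1 : PySem.Str.startswith s "class " = true) :
    PySem.Str.startswith s "    def " = false := by
  rw [Bool.eq_false_iff]
  intro h2
  rw [PySem.Str.startswith_eq, PySem.Chars.startswith_iff] at h1 h2
  obtain ⟨t1, ht1⟩ := h1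
  obtain ⟨t2, ht2⟩ := h2
  rw [← ht2] at ht1
  simp at ht1

-- pure Bool reassociation between B's way and A's way of writing the four-fold conjunction
theorem pvAndComm4 (a b c d : Bool) : (b && d && (a && c)) = (a && b && c && d) := by
  cases a <;> cases b <;> cases c <;> cases d <;> rfl

-- B's step, characterised through pvDup (the name comparison is symmetric, the &&s reassociate)
theorem pvStepB_nil (raw : String) : pvStepB [] raw = [PySem.Str.rstrip raw] := by
  simp [pvStepB]

theorem pvStepB_cons (top : String) (rest : List String) (raw : String) :
    pvStepB (top :: rest) raw =
      if pvDup top (PySem.Str.rstrip raw) then PySem.Str.rstrip raw :: rest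
      else PySem.Str.rstrip raw :: top :: rest := by
  have hbeq : (pvMethodName top == pvMethodName (PySem.Str.rstrip raw)) =
      (pvMethodName (PySem.Str.rstrip raw) == pvMethodName top) := by
    by_cases hmn : pvMethodName top = pvMethodName (PySem.Str.rstrip raw)
    · simp [hmn]
    · simp [hmn, Ne.symm hmn]
  simp only [pvStepB, List.tail_cons]
  rw [hbeq, pvAndComm4]
  rfl

-- A's step, characterised through pvDup: every non-skipping branch appends the rstripped line
theorem pvLoopA_one (l : String) : pvLoopA [l] = [PySem.Str.rstrip l] := by
  show (if PySem.Str.rstrip l = "" then [""] else _) = _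
  split_ifs with h1 h2 h3 <;> simp [pvLoopA, h1]

theorem pvLoopA_cons2 (l next : String) (rest2 : List String) :
    pvLoopA (l :: next :: rest2) =
      (if pvDup (PySem.Str.rstrip l) (PySem.Str.rstrip next) = true then pvLoopA (next :: rest2)
       else PySem.Str.rstrip l :: pvLoopA (next :: rest2)) := by
  have hA : pvLoopA (l :: next :: rest2) =
      (if PySem.Str.rstrip l = "" then "" :: pvLoopA (next :: rest2)
       else if PySem.Str.startswith (PySem.Str.rstrip l) "class " = true then
         PySem.Str.rstrip l :: pvLoopA (next :: rest2)
       else if PySem.Str.startswith (PySem.Str.rstrip l) "    def " = true then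
         (if (PySem.Str.startswith (PySem.Str.rstrip next) "    def " &&
              pvMethodName (PySem.Str.rstrip next) == pvMethodName (PySem.Str.rstrip l) &&
              PySem.Str.isIn "\"\"\"" (PySem.Str.rstrip next)) = true
          then pvLoopA (next :: rest2) else PySem.Str.rstrip l :: pvLoopA (next :: rest2))
       else PySem.Str.rstrip l :: pvLoopA (next :: rest2)) := rfl
  rw [hA]
  by_cases h1 : PySem.Str.rstrip l = ""
  · rw [if_pos h1, pvDup_not_def _ (by rw [h1]; decide), h1]
    simp
  · rw [if_neg h1]
    by_cases h2 : PySem.Str.startswith (PySem.Str.rstrip l) "class " = true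
    · rw [if_pos h2, pvDup_not_def _ (pvNotClassDef _ h2)]
      simp
    · rw [if_neg h2]
      by_cases h3 : PySem.Str.startswith (PySem.Str.rstrip l) "    def " = true
      · rw [if_pos h3, ← pvDup_of_def _ h3]
      · rw [if_neg h3, pvDup_not_def _ (Bool.eq_false_iff.mpr h3)]
        simp

theorem pvFoldB_eq (lines : List String) : ∀ (top : String) (accrest : List String),
    lines.foldl pvStepB (top :: accrest) = pvH top lines ++ accrest := by
  induction lines with
  | nil => intro top accrest; simp [pvH]
  | cons l rest ih =>
    intro top accrest
    rw [List.foldl_cons, pvStepB_cons]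
    show _ = (if pvDup top (PySem.Str.rstrip l) then pvH (PySem.Str.rstrip l) rest
              else pvH (PySem.Str.rstrip l) rest ++ [top]) ++ accrest
    by_cases hd : pvDup top (PySem.Str.rstrip l) = true
    · rw [if_pos hd, if_pos hd, ih]
    · rw [if_neg hd, if_neg hd, ih]
      simp

theorem pvLoopA_eq (rest : List String) : ∀ (l : String),
    pvLoopA (l :: rest) = (pvH (PySem.Str.rstrip l) rest).reverse := by
  induction rest with
  | nil => intro l; rw [pvLoopA_one]; rfl
  | cons next rest2 ih =>
    intro l
    rw [pvLoopA_cons2]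
    show _ = (if pvDup (PySem.Str.rstrip l) (PySem.Str.rstrip next)
              then pvH (PySem.Str.rstrip next) rest2
              else pvH (PySem.Str.rstrip next) rest2 ++ [PySem.Str.rstrip l]).reverse
    by_cases hd : pvDup (PySem.Str.rstrip l) (PySem.Str.rstrip next) = true
    · rw [if_pos hd, if_pos hd, ih]
    · rw [if_neg hd, if_neg hd, ih]
      simp

-- ===== VERDICT (by name: the statement is the Claim_ definition above) =====
theorem fix_duplicate_methods_and_indent_spec : Claim_equal_fix_duplicate_methods_and_indent := by
  intro content _
  unfold Spec_fix_duplicate_methods_and_indent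
  unfold fix_duplicate_methods_and_indent fix_duplicate_methods_and_indent_alt
  cases h : pvSplit content "\n" with
  | nil => rfl
  | cons l rest =>
    rw [List.foldl_cons, pvStepB_nil, pvFoldB_eq rest (PySem.Str.rstrip l) [], List.append_nil,
      pvLoopA_eq rest l]
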